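-- pv_equiv track=rewrite | github.com/AlexMnrs/UnlimitedGmail | main.py | generar_alias
-- ===== SOURCE A (Python) =====
-- def generar_alias(usuario: str):
--     """
--     Genera todas las combinaciones posibles de puntos para el usuario dado.
--     Utiliza un enfoque iterativo basado en bitmasks para eficiencia.
--
--     Args:
--         usuario (str): Nombre de usuario base.
--
--     Yields:
--         str: Alias generado.
--     """
--     n = len(usuario)
--     if n <= 1:
--         yield usuario
--         return
--
--     # Hay n-1 espacios posibles donde poner punto.
--     # Iteramos desde 0 hasta 2^(n-1) - 1
--     total_combinaciones = 1 << (n - 1)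
--
--     for i in range(total_combinaciones):
--         resultado = ""
--         for j in range(n):
--             resultado += usuario[j]
--             # Si no es el último caracter y el bit correspondiente está activo, añadir punto
--             # El bit j controla el espacio después del caracter j
--             if j < n - 1 and (i & (1 << j)):
--                 resultado += "."
--         yield resultado
-- ===== SOURCE B (Python) =====
-- def generar_alias(usuario: str):
--     if len(usuario) <= 1:
--         yield usuario
--         return
--     c = usuario[0]
--     for t in generar_alias(usuario[1:]):
--         yield c + t
--         yield c + "." + t
-- ===== Notes on version B (the rewrite author's own statement) =====
-- stated objective: simpler
-- what changed: Replaced the bitmask counting loop with nested index loop by a short structural recursion on the string: for each alias of the tail, yield it with the head, then with head plus a dot.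
import Mathlib
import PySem

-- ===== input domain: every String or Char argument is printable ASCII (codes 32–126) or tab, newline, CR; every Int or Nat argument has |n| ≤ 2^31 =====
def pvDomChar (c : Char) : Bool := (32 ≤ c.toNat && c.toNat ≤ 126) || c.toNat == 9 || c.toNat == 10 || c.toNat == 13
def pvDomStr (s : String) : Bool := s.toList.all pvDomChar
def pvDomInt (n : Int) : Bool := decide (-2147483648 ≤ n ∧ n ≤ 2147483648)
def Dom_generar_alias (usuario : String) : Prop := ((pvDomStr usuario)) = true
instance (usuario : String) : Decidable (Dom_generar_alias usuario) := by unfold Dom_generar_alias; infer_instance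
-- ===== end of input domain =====

-- B replaces A's bitmask counting loop by a structural recursion on the string (simpler decomposition, same cost).

-- ===== PORT A =====
-- Inner loop 'for j in range(n): resultado += usuario[j]; if j < n-1 and (i & (1 << j)): resultado += "."'
-- as a foldl over the index range, on the char-list side; 'i & (1 << j)' nonzero is Nat.testBit i j.
def buildRowA (cs : List Char) (i : Nat) : List Char :=
  (List.range cs.length).foldl
    (fun res j =>
      let res := res ++ [cs.getD j ' ']
      if j < cs.length - 1 ∧ i.testBit j then res ++ ['.'] else res)
    []

def generar_alias (usuario : String) : List String :=
  let cs := usuario.toList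
  let n := cs.length
  if n ≤ 1 then [usuario]
  else
    (List.range (2 ^ (n - 1))).map (fun i => String.ofList (buildRowA cs i))

-- ===== PORT B =====
-- Source B's recursion on usuario[1:], on the char-list side; each yielded pair [c+t, c+"."+t] becomes two cons forms.
def altGo : List Char → List (List Char)
  | [] => [[]]
  | [c] => [[c]]
  | c :: rest => (altGo rest).flatMap (fun t => [c :: t, c :: '.' :: t])

def generar_alias_alt (usuario : String) : List String :=
  if usuario.toList.length ≤ 1 then [usuario]
  else (altGo usuario.toList).map String.ofList

-- ===== PRECONDITION & SPEC =====
def Spec_generar_alias (usuario : String) (out : List String) : Prop := out = generar_alias_alt usuario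
instance (usuario : String) (out : List String) : Decidable (Spec_generar_alias usuario out) := by unfold Spec_generar_alias; infer_instance

-- ===== CLAIM (what is proved, stated in full; the proofs are below) =====
def Claim_equal_generar_alias : Prop := ∀ (usuario : String), Dom_generar_alias usuario → Spec_generar_alias usuario (generar_alias usuario)

-- ===== LEMMAS AND PROOFS =====

-- A's inner loop only ever appends to the accumulator, so it is a flatMap over the index range.
lemma buildRowA_eq_flatMap (cs : List Char) (i : Nat) :
    buildRowA cs i =
      (List.range cs.length).flatMap
        (fun j => cs.getD j ' ' :: (if j < cs.length - 1 ∧ i.testBit j then ['.'] else [])) := by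
  unfold buildRowA
  have hstep : (fun (res : List Char) j =>
        let res := res ++ [cs.getD j ' ']
        if j < cs.length - 1 ∧ i.testBit j then res ++ ['.'] else res)
      = (fun (res : List Char) j =>
        res ++ (cs.getD j ' ' :: (if j < cs.length - 1 ∧ i.testBit j then ['.'] else []))) := by
    funext res j
    by_cases hc : j < cs.length - 1 ∧ i.testBit j <;> simp [hc]
  rw [hstep, PySem.List.foldl_append_eq_flatMap]
  simp

-- Peeling the head character: gap 0 is decided by bit 0, the rest is buildRowA on the tail with i/2.
lemma buildRowA_cons (c : Char) (rest : List Char) (hrest : rest ≠ []) (i : Nat) :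
    buildRowA (c :: rest) i =
      c :: (if i.testBit 0 then ['.'] else []) ++ buildRowA rest (i / 2) := by
  rw [buildRowA_eq_flatMap, buildRowA_eq_flatMap]
  have h0 : 0 < rest.length := List.length_pos_iff.mpr hrest
  simp only [List.length_cons, Nat.add_sub_cancel, List.range_succ_eq_map, List.flatMap_cons,
    List.flatMap_map, Nat.succ_eq_add_one]
  congr 1
  · simp [h0]
  · congr 1
    funext j
    have hb : i.testBit (j + 1) = (i / 2).testBit j := Nat.testBit_succ ..
    have hl : (j + 1 < rest.length) = (j < rest.length - 1) := by
      simp only [eq_iff_iff]; omega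
    simp [hb, hl]

-- Counting 0,1,2,… over 2N values is the pairs (2q, 2q+1) for q = 0,…,N-1 in order.
lemma pvRangeTwoMul (N : Nat) :
    List.range (2 * N) = (List.range N).flatMap (fun q => [2 * q, 2 * q + 1]) := by
  induction N with
  | zero => rfl
  | succ n ih =>
      have : 2 * (n + 1) = (2 * n + 1) + 1 := by ring
      rw [this, List.range_succ, List.range_succ, List.range_succ, List.flatMap_append, ← ih]
      simp

-- The core equivalence on char lists: A's bitmask enumeration equals B's recursion.
lemma map_buildRowA_eq_altGo (cs : List Char) (hcs : cs ≠ []) :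
    (List.range (2 ^ (cs.length - 1))).map (fun i => buildRowA cs i) = altGo cs := by
  induction cs with
  | nil => exact absurd rfl hcs
  | cons c rest ih =>
      cases rest with
      | nil =>
          simp [altGo, buildRowA, List.range_succ]
      | cons d ds =>
          have hrest : (d :: ds) ≠ [] := by simp
          have hpow : 2 ^ ((c :: d :: ds).length - 1) = 2 * 2 ^ ((d :: ds).length - 1) := by
            simp only [List.length_cons, Nat.add_sub_cancel]
            rw [pow_succ, Nat.mul_comm]
          rw [hpow, pvRangeTwoMul, List.map_flatMap]
          have hstep : (fun q => List.map (fun i => buildRowA (c :: d :: ds) i) [2 * q, 2 * q + 1])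
              = (fun q => [c :: buildRowA (d :: ds) q, c :: '.' :: buildRowA (d :: ds) q]) := by
            funext q
            have h1 : buildRowA (c :: d :: ds) (2 * q)
                = c :: buildRowA (d :: ds) q := by
              rw [buildRowA_cons c _ hrest]
              have hb : (2 * q).testBit 0 = false := by
                simp [Nat.testBit_zero, Nat.mul_mod_right]
              have hd : 2 * q / 2 = q := by omega
              simp [hb, hd]
            have h2 : buildRowA (c :: d :: ds) (2 * q + 1)
                = c :: '.' :: buildRowA (d :: ds) q := by
              rw [buildRowA_cons c _ hrest]
              have hb : (2 * q + 1).testBit 0 = true := by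
                simp [Nat.testBit_zero]
              have hd : (2 * q + 1) / 2 = q := by omega
              simp [hb, hd]
            simp [h1, h2]
          rw [hstep]
          have ihr := ih hrest
          rw [show altGo (c :: d :: ds) = (altGo (d :: ds)).flatMap
                (fun t => [c :: t, c :: '.' :: t]) from rfl,
              ← ihr, List.flatMap_map]

-- ===== VERDICT (by name: the statement is the Claim_ definition above) =====
theorem generar_alias_spec : Claim_equal_generar_alias := by
  intro usuario _
  unfold Spec_generar_alias generar_alias generar_alias_alt
  by_cases h : usuario.toList.length ≤ 1
  · rw [if_pos h, if_pos h]
  · have hne : usuario.toList ≠ [] := by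
      intro hnil; rw [hnil] at h; simp at h
    rw [if_neg h, if_neg h, ← map_buildRowA_eq_altGo usuario.toList hne, List.map_map]
    rfl
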